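-- pv_equiv track=rewrite | github.com/ftzm/hnefatafl | max_moves.py | greedy_add
-- ===== SOURCE A (Python) =====
-- SIZE = 11
--
-- def compute_moves(pieces):
--     """Given a set of piece positions, compute total moves."""
--     # Build row and column lookup for fast neighbor finding
--     row_pieces = [[] for _ in range(SIZE)]
--     col_pieces = [[] for _ in range(SIZE)]
--     for r, c in pieces:
--         row_pieces[r].append(c)
--         col_pieces[c].append(r)
--     for i in range(SIZE):
--         row_pieces[i].sort()
--         col_pieces[i].sort()
--
--     total = 0
--     for r, c in pieces:
--         # Horizontal moves
--         cols = row_pieces[r]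
--         idx = cols.index(c)
--         # Left
--         left = c - (cols[idx-1] + 1) if idx > 0 else c
--         # Right
--         right = (cols[idx+1] - 1) - c if idx < len(cols) - 1 else (SIZE - 1) - c
--         # Vertical moves
--         rows = col_pieces[c]
--         idy = rows.index(r)
--         # Up
--         up = r - (rows[idy-1] + 1) if idy > 0 else r
--         # Down
--         down = (rows[idy+1] - 1) - r if idy < len(rows) - 1 else (SIZE - 1) - r
--         total += left + right + up + down
--     return total
--
-- def greedy_add(n):
--     """Greedily add pieces one at a time to maximize total moves."""
--     pieces = set()
--     for _ in range(n):
--         best_pos = None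
--         best_val = -1
--         for r in range(SIZE):
--             for c in range(SIZE):
--                 if (r, c) not in pieces:
--                     val = compute_moves(pieces | {(r, c)})
--                     if val > best_val:
--                         best_val = val
--                         best_pos = (r, c)
--         pieces.add(best_pos)
--     return pieces, compute_moves(pieces)
-- ===== SOURCE B (Python) =====
-- SIZE = 11
--
-- # Closed form: a line (row or column) holding k pieces spanning [lo, hi]
-- # contributes (SIZE-1) + (hi-lo) - 2*(k-1) moves in total, so the board total
-- # can be kept as a running value and each candidate scored in O(1).
--
-- def _delta(s, v):
--     """Change of a line's contribution when a piece at v joins line stats s."""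
--     if s is None:
--         return SIZE - 1
--     _, lo, hi = s
--     return max(hi, v) - min(lo, v) - (hi - lo) - 2
--
-- def _acc(s, v):
--     """Line stats (count, lo, hi) after adding a piece at v."""
--     if s is None:
--         return (1, v, v)
--     cnt, lo, hi = s
--     return (cnt + 1, min(lo, v), max(hi, v))
--
-- def greedy_add(n):
--     """Greedily add pieces one at a time to maximize total moves."""
--     pieces = set()
--     rows = [None] * SIZE   # per-row (count, min col, max col)
--     cols = [None] * SIZE   # per-column (count, min row, max row)
--     total = 0
--     for _ in range(n):
--         best_pos = None
--         best_val = -1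
--         for r in range(SIZE):
--             for c in range(SIZE):
--                 if (r, c) not in pieces:
--                     val = total + _delta(rows[r], c) + _delta(cols[c], r)
--                     if val > best_val:
--                         best_val = val
--                         best_pos = (r, c)
--         if best_pos is not None:
--             r, c = best_pos
--             pieces.add(best_pos)
--             rows[r] = _acc(rows[r], c)
--             cols[c] = _acc(cols[c], r)
--             total = best_val
--     return pieces, total
-- ===== Notes on version B (the rewrite author's own statement) =====
-- stated objective: faster
-- what changed: B drops compute_moves entirely: instead of rebuilding and sorting row/column lookup lists and scanning sorted neighbours for every piece at every candidate, it keeps a running total plus per-line (count,min,max) stats and scores each candidate with an O(1) closed-form delta ((SIZE-1)+(hi-lo)-2*(cnt-1) per line).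
import Mathlib
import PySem

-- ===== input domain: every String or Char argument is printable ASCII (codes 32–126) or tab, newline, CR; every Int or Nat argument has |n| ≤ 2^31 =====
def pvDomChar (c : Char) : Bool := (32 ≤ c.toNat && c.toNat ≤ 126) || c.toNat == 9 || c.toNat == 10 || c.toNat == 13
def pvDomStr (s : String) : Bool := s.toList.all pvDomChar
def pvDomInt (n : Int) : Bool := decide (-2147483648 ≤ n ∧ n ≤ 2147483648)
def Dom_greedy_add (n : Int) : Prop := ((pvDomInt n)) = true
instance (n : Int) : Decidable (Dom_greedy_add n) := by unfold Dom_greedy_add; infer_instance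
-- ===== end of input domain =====

-- B replaces A's per-candidate full-board recomputation (rebuild + sort row/column
-- lists, per-piece neighbour indexing) by a running total with per-line
-- (count,min,max) stats and an O(1) delta per candidate; measurably faster.

-- ===== PORT A =====
-- compute_moves: build row/col lookup lists (Python `row_pieces[r].append(c)`)
def cmBuild (pieces : List (Int × Int)) : List (List Int) × List (List Int) :=
  pieces.foldl
    (fun acc p =>
      (PySem.List.pySetD acc.1 p.1 (PySem.List.pyGetD acc.1 p.1 [] ++ [p.2]),
       PySem.List.pySetD acc.2 p.2 (PySem.List.pyGetD acc.2 p.2 [] ++ [p.1])))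
    (List.replicate 11 [], List.replicate 11 [])

-- `for i in range(SIZE): row_pieces[i].sort()`
def cmSort (a : List (List Int)) : List (List Int) :=
  (PySem.List.pyRange 0 11 1).foldl
    (fun a i =>
      PySem.List.pySetD a i (PySem.List.sorted (PySem.List.pyGetD a i []) (fun x => x) false))
    a

def compute_moves (pieces : List (Int × Int)) : Int :=
  let rp := cmSort (cmBuild pieces).1
  let cp := cmSort (cmBuild pieces).2
  pieces.foldl
    (fun total p =>
      let cols := PySem.List.pyGetD rp p.1 []
      -- `cols.index(c)`: c is always in cols at every call site, ValueError unreachable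
      let idx := (PySem.List.index? cols p.2).getD 0
      let left := if 0 < idx then p.2 - (cols.getD (idx - 1) 0 + 1) else p.2
      let right := if idx < cols.length - 1 then (cols.getD (idx + 1) 0 - 1) - p.2 else (11 - 1) - p.2
      let rows := PySem.List.pyGetD cp p.2 []
      let idy := (PySem.List.index? rows p.1).getD 0
      let up := if 0 < idy then p.1 - (rows.getD (idy - 1) 0 + 1) else p.1
      let down := if idy < rows.length - 1 then (rows.getD (idy + 1) 0 - 1) - p.1 else (11 - 1) - p.1
      total + (left + right + (up + down)))
    0

def greedy_add (n : Int) : (List (Int × Int)) × Int :=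
  let pieces : PySem.Set (Int × Int) := PySem.Set.empty
  let pieces :=
    (PySem.List.pyRange 0 n 1).foldl
      (fun pieces _ =>
        let best :=
          (PySem.List.pyRange 0 11 1).foldl
            (fun best r =>
              (PySem.List.pyRange 0 11 1).foldl
                (fun (best : Option (Int × Int) × Int) c =>
                  if PySem.Set.contains pieces (r, c) then best
                  else
                    let val := compute_moves (PySem.Set.add pieces (r, c))
                    if best.2 < val then (some (r, c), val) else best)
                best)
            ((none : Option (Int × Int)), (-1 : Int))
        -- `pieces.add(best_pos)`: within Pre_ best is always `some`; Python's
        -- adding of None (only reachable for n ≥ 122, where A later raises) is not modelled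
        match best.1 with
        | some p => PySem.Set.add pieces p
        | none => pieces)
      pieces
  (pieces, compute_moves pieces)

-- ===== PORT B =====
def pvDelta (s : Option (Int × Int × Int)) (v : Int) : Int :=
  match s with
  | none => 11 - 1
  | some (_, lo, hi) => max hi v - min lo v - (hi - lo) - 2

def pvAcc (s : Option (Int × Int × Int)) (v : Int) : Option (Int × Int × Int) :=
  match s with
  | none => some (1, v, v)
  | some (cnt, lo, hi) => some (cnt + 1, min lo v, max hi v)

def greedy_add_alt (n : Int) : (List (Int × Int)) × Int :=
  let st :=
    (PySem.List.pyRange 0 n 1).foldl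
      (fun (st : PySem.Set (Int × Int) × List (Option (Int × Int × Int)) ×
                 List (Option (Int × Int × Int)) × Int) _ =>
        let pieces := st.1
        let rows := st.2.1
        let cols := st.2.2.1
        let total := st.2.2.2
        let best :=
          (PySem.List.pyRange 0 11 1).foldl
            (fun best r =>
              (PySem.List.pyRange 0 11 1).foldl
                (fun (best : Option (Int × Int) × Int) c =>
                  if PySem.Set.contains pieces (r, c) then best
                  else
                    let val := total + pvDelta (PySem.List.pyGetD rows r none) c
                                     + pvDelta (PySem.List.pyGetD cols c none) r
                    if best.2 < val then (some (r, c), val) else best)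
                best)
            ((none : Option (Int × Int)), (-1 : Int))
        match best.1 with
        | some p =>
            (PySem.Set.add pieces p,
             PySem.List.pySetD rows p.1 (pvAcc (PySem.List.pyGetD rows p.1 none) p.2),
             PySem.List.pySetD cols p.2 (pvAcc (PySem.List.pyGetD cols p.2 none) p.1),
             best.2)
        | none => st)
      (PySem.Set.empty, List.replicate 11 none, List.replicate 11 none, 0)
  (st.1, st.2.2.2)

-- ===== PRECONDITION & SPEC =====
-- Pre_ excludes exactly n ≥ 122: there the board fills up, A adds None to the set
-- and the final compute_moves raises TypeError.
def Pre_greedy_add (n : Int) : Prop := n ≤ 121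
instance (n : Int) : Decidable (Pre_greedy_add n) := by unfold Pre_greedy_add; infer_instance
def pvWitness_greedy_add : Int := 3

def Spec_greedy_add (n : Int) (out : (List (Int × Int)) × Int) : Prop := out = greedy_add_alt n
instance (n : Int) (out : (List (Int × Int)) × Int) : Decidable (Spec_greedy_add n out) := by unfold Spec_greedy_add; infer_instance

-- ===== CLAIM (what is proved, stated in full; the proofs are below) =====
def Claim_equal_greedy_add : Prop := ∀ (n : Int), Dom_greedy_add n → Pre_greedy_add n → Spec_greedy_add n (greedy_add n)


-- ===== LEMMAS AND PROOFS =====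

-- proof-side view of the SIZE-11 slot arrays both ports use
def pvArr {α : Type} (g : Int → α) : List α := (List.range 11).map (fun k : Nat => g (k : Int))

-- the column of entries of P in line r, in insertion order
def lineOf (P : List (Int × Int)) (r : Int) : List Int :=
  P.filterMap (fun p => if p.1 = r then some p.2 else none)

def statsOf (l : List Int) : Option (Int × Int × Int) := l.foldl pvAcc none

def axv : Option (Int × Int × Int) → Int
  | none => 0
  | some s => (11 - 1) + (s.2.2 - s.2.1) - 2 * (s.1 - 1)

def MRow (P : List (Int × Int)) : Int := ∑ r ∈ Finset.range 11, axv (statsOf (lineOf P (r : Int)))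

def MTot (P : List (Int × Int)) : Int := MRow P + MRow (P.map Prod.swap)

def InGrid (P : List (Int × Int)) : Prop := ∀ p ∈ P, 0 ≤ p.1 ∧ p.1 < 11 ∧ 0 ≤ p.2 ∧ p.2 < 11

-- the per-piece horizontal (resp. vertical) move count A computes from a line list
def rowH (l : List Int) (c : Int) : Int :=
  let idx := (PySem.List.index? l c).getD 0
  (if 0 < idx then c - (l.getD (idx - 1) 0 + 1) else c) +
  (if idx < l.length - 1 then (l.getD (idx + 1) 0 - 1) - c else (11 - 1) - c)

def sLine (P : List (Int × Int)) (r : Int) : List Int :=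
  PySem.List.sorted (lineOf P r) (fun x => x) false

lemma pvArr_getD {α : Type} (g : Int → α) (r : Int) (d : α) (h0 : 0 ≤ r) (h1 : r < 11) :
    PySem.List.pyGetD (pvArr g) r d = g r := by
  unfold pvArr
  have hr : r = ((r.toNat : Nat) : Int) := by omega
  rw [hr, PySem.List.pyGetD_natCast]
  rw [List.getD_eq_getElem _ _ (by simp; omega)]
  rw [List.getElem_map, List.getElem_range]

lemma pvArr_setD {α : Type} (g : Int → α) (r : Int) (v : α) (h0 : 0 ≤ r) (h1 : r < 11) :
    PySem.List.pySetD (pvArr g) r v = pvArr (fun k => if k = r then v else g k) := by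
  unfold pvArr
  have hr : r = ((r.toNat : Nat) : Int) := by omega
  rw [hr, PySem.List.pySetD_natCast]
  apply List.ext_getElem (by simp)
  intro i hi1 hi2
  simp only [List.length_set, List.length_map, List.length_range] at hi1
  rw [List.getElem_set]
  rw [List.getElem_map, List.getElem_range]
  rw [List.getElem_map, List.getElem_range]
  by_cases e : r.toNat = i
  · rw [if_pos e]
    simp only []
    rw [if_pos (by omega : ((i : Int) = ((r.toNat : Nat) : Int)))]
  · rw [if_neg e]
    simp only []
    rw [if_neg (by omega : ¬ ((i : Int) = ((r.toNat : Nat) : Int)))]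

lemma pvArr_congr {α : Type} {g h : Int → α} (H : ∀ k : Int, 0 ≤ k → k < 11 → g k = h k) :
    pvArr g = pvArr h := by
  unfold pvArr
  apply List.map_congr_left
  intro k hk
  simp only [List.mem_range] at hk
  exact H k (by omega) (by exact_mod_cast hk)

lemma pvArr_const {α : Type} (x : α) : pvArr (fun _ => x) = List.replicate 11 x := by
  simp [pvArr]

lemma mem_lineOf {P : List (Int × Int)} {r c : Int} : c ∈ lineOf P r ↔ (r, c) ∈ P := by
  simp only [lineOf, List.mem_filterMap]
  constructor
  · rintro ⟨⟨a, b⟩, hp, h⟩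
    simp only at h
    split at h
    · next e => cases h; exact e ▸ hp
    · cases h
  · intro hp
    exact ⟨(r, c), hp, by simp⟩

lemma lineOf_append (P Q : List (Int × Int)) (r : Int) :
    lineOf (P ++ Q) r = lineOf P r ++ lineOf Q r := by
  simp [lineOf]

lemma lineOf_cons (p : Int × Int) (P : List (Int × Int)) (r : Int) :
    lineOf (p :: P) r = if p.1 = r then p.2 :: lineOf P r else lineOf P r := by
  by_cases e : p.1 = r
  · simp [lineOf, e]
  · simp [lineOf, e]

lemma lineOf_nodup {P : List (Int × Int)} (h : P.Nodup) (r : Int) : (lineOf P r).Nodup := by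
  induction P with
  | nil => simp [lineOf]
  | cons p P ih =>
    rcases List.nodup_cons.mp h with ⟨hp, hP⟩
    rw [lineOf_cons]
    by_cases e : p.1 = r
    · rw [if_pos e]
      refine List.nodup_cons.mpr ⟨fun hm => hp ?_, ih hP⟩
      have hmem : (r, p.2) ∈ P := mem_lineOf.mp hm
      rw [← e] at hmem
      exact hmem
    · rw [if_neg e]; exact ih hP


lemma buildFold (P : List (Int × Int)) (hG : InGrid P) (g : Int → List Int) :
    P.foldl (fun a p => PySem.List.pySetD a p.1 (PySem.List.pyGetD a p.1 [] ++ [p.2])) (pvArr g)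
      = pvArr (fun k => g k ++ lineOf P k) := by
  induction P generalizing g with
  | nil =>
    simp only [List.foldl_nil]
    exact pvArr_congr (fun k _ _ => by simp [lineOf])
  | cons p P ih =>
    have hp := hG p (List.mem_cons_self ..)
    have hG' : InGrid P := fun q hq => hG q (List.mem_cons_of_mem _ hq)
    rw [List.foldl_cons, pvArr_getD g p.1 [] hp.1 hp.2.1, pvArr_setD g p.1 _ hp.1 hp.2.1,
        ih hG']
    refine pvArr_congr (fun k hk0 hk1 => ?_)
    by_cases e : k = p.1
    · rw [if_pos e, lineOf_cons, if_pos e.symm, e]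
      simp
    · rw [if_neg e, lineOf_cons, if_neg (fun h => e h.symm)]

lemma cmBuild_fst (P : List (Int × Int)) (hG : InGrid P) :
    (cmBuild P).1 = pvArr (fun k => lineOf P k) := by
  unfold cmBuild
  rw [PySem.List.foldl_prod_mk
      (f := fun a (p : Int × Int) => PySem.List.pySetD a p.1 (PySem.List.pyGetD a p.1 [] ++ [p.2]))
      (g := fun a (p : Int × Int) => PySem.List.pySetD a p.2 (PySem.List.pyGetD a p.2 [] ++ [p.1]))]
  rw [← pvArr_const ([] : List Int), buildFold P hG]
  dsimp only
  exact pvArr_congr (fun k _ _ => by simp)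

lemma cmBuild_snd (P : List (Int × Int)) (hG : InGrid P) :
    (cmBuild P).2 = pvArr (fun k => lineOf (P.map Prod.swap) k) := by
  unfold cmBuild
  rw [PySem.List.foldl_prod_mk
      (f := fun a (p : Int × Int) => PySem.List.pySetD a p.1 (PySem.List.pyGetD a p.1 [] ++ [p.2]))
      (g := fun a (p : Int × Int) => PySem.List.pySetD a p.2 (PySem.List.pyGetD a p.2 [] ++ [p.1]))]
  have hGs : InGrid (P.map Prod.swap) := by
    intro q hq
    rcases List.mem_map.mp hq with ⟨p, hp, rfl⟩
    have := hG p hp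
    exact ⟨this.2.2.1, this.2.2.2, this.1, this.2.1⟩
  have : (P.map Prod.swap).foldl
      (fun a (p : Int × Int) => PySem.List.pySetD a p.1 (PySem.List.pyGetD a p.1 [] ++ [p.2]))
      (pvArr (fun _ => ([] : List Int)))
      = pvArr (fun k => lineOf (P.map Prod.swap) k) := by
    rw [buildFold _ hGs]
    exact pvArr_congr (fun k _ _ => by simp)
  rw [← pvArr_const ([] : List Int)]
  rw [List.foldl_map] at this
  dsimp only
  exact this

lemma sortFold (L : List Int) (hL : ∀ i ∈ L, 0 ≤ i ∧ i < 11) (g : Int → List Int) :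
    L.foldl (fun a i =>
        PySem.List.pySetD a i (PySem.List.sorted (PySem.List.pyGetD a i []) (fun x => x) false))
      (pvArr g)
      = pvArr (fun k => if k ∈ L then PySem.List.sorted (g k) (fun x => x) false else g k) := by
  induction L generalizing g with
  | nil =>
    simp only [List.foldl_nil]
    exact pvArr_congr (fun k _ _ => by simp)
  | cons i L ih =>
    have hi := hL i (List.mem_cons_self ..)
    have hL' : ∀ j ∈ L, 0 ≤ j ∧ j < 11 := fun j hj => hL j (List.mem_cons_of_mem _ hj)
    rw [List.foldl_cons, pvArr_getD g i [] hi.1 hi.2, pvArr_setD g i _ hi.1 hi.2, ih hL']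
    refine pvArr_congr (fun k hk0 hk1 => ?_)
    by_cases eL : k ∈ L
    · rw [if_pos eL, if_pos (List.mem_cons_of_mem _ eL)]
      by_cases e : k = i
      · subst e; rw [if_pos rfl, PySem.List.sorted_sorted]
      · rw [if_neg e]
    · rw [if_neg eL]
      by_cases e : k = i
      · subst e; rw [if_pos rfl, if_pos (by simp)]
      · rw [if_neg e, if_neg (by simp [e, eL])]

lemma cmSort_arr (g : Int → List Int) :
    cmSort (pvArr g) = pvArr (fun k => PySem.List.sorted (g k) (fun x => x) false) := by
  unfold cmSort
  rw [sortFold _ (fun i hi => (PySem.List.mem_pyRange_one).mp hi) g]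
  exact pvArr_congr (fun k hk0 hk1 =>
    if_pos ((PySem.List.mem_pyRange_one).mpr ⟨hk0, hk1⟩))

lemma group_sum (P : List (Int × Int)) (hG : InGrid P) (G : Int → Int → Int) :
    (P.map (fun p => G p.1 p.2)).sum
      = ∑ r ∈ Finset.range 11, ((lineOf P (r : Int)).map (G (r : Int))).sum := by
  induction P with
  | nil => simp [lineOf]
  | cons p P ih =>
    have hp := hG p (List.mem_cons_self ..)
    have hG' : InGrid P := fun q hq => hG q (List.mem_cons_of_mem _ hq)
    have hstep : ∀ r : Nat, ((lineOf (p :: P) (r : Int)).map (G (r : Int))).sum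
        = (if r = p.1.toNat then G (r : Int) p.2 else 0)
          + ((lineOf P (r : Int)).map (G (r : Int))).sum := by
      intro r
      rw [lineOf_cons]
      by_cases e : p.1 = (r : Int)
      · rw [if_pos e, if_pos (by omega)]
        simp
      · rw [if_neg e, if_neg (by omega)]
        simp
    simp only [List.map_cons, List.sum_cons]
    rw [ih hG']
    rw [Finset.sum_congr rfl (fun r _ => hstep r)]
    rw [Finset.sum_add_distrib,
        Finset.sum_ite_eq_of_mem' (Finset.range 11) p.1.toNat
          (fun r => G (r : Int) p.2) (Finset.mem_range.mpr (by omega))]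
    have hc : ((p.1.toNat : Nat) : Int) = p.1 := by omega
    rw [hc]

lemma statsFold (l : List Int) (c lo hi : Int) :
    ∃ m M : Int, l.foldl pvAcc (some (c, lo, hi)) = some (c + l.length, m, M) ∧
      (m = lo ∨ m ∈ l) ∧ m ≤ lo ∧ (∀ x ∈ l, m ≤ x) ∧
      (M = hi ∨ M ∈ l) ∧ hi ≤ M ∧ (∀ x ∈ l, x ≤ M) := by
  induction l generalizing c lo hi with
  | nil =>
    exact ⟨lo, hi, by simp, Or.inl rfl, le_refl _, by simp, Or.inl rfl, le_refl _, by simp⟩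
  | cons v l ih =>
    obtain ⟨m, M, hfold, hm1, hm2, hm3, hM1, hM2, hM3⟩ := ih (c + 1) (min lo v) (max hi v)
    refine ⟨m, M, ?_, ?_, ?_, ?_, ?_, ?_, ?_⟩
    · rw [List.foldl_cons,
          show pvAcc (some (c, lo, hi)) v = some (c + 1, min lo v, max hi v) from rfl, hfold]
      have : c + 1 + (l.length : Int) = c + ((v :: l).length : Int) := by
        simp; ring
      rw [this]
    · rcases hm1 with h | h
      · rcases min_choice lo v with e | e
        · exact Or.inl (h.trans e)
        · exact Or.inr (by rw [h, e]; exact List.mem_cons_self ..)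
      · exact Or.inr (List.mem_cons_of_mem _ h)
    · exact le_trans hm2 (min_le_left _ _)
    · intro x hx
      rcases List.mem_cons.mp hx with e | e
      · exact e ▸ le_trans hm2 (min_le_right _ _)
      · exact hm3 x e
    · rcases hM1 with h | h
      · rcases max_choice hi v with e | e
        · exact Or.inl (h.trans e)
        · exact Or.inr (by rw [h, e]; exact List.mem_cons_self ..)
      · exact Or.inr (List.mem_cons_of_mem _ h)
    · exact le_trans (le_max_left _ _) hM2
    · intro x hx
      rcases List.mem_cons.mp hx with e | e
      · exact e ▸ le_trans (le_max_right _ _) hM2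
      · exact hM3 x e

lemma statsOf_char (l : List Int) (h : l ≠ []) :
    ∃ m M : Int, statsOf l = some ((l.length : Int), m, M) ∧
      m ∈ l ∧ (∀ x ∈ l, m ≤ x) ∧ M ∈ l ∧ (∀ x ∈ l, x ≤ M) := by
  match l with
  | [] => exact absurd rfl h
  | v :: t =>
    obtain ⟨m, M, hfold, hm1, hm2, hm3, hM1, hM2, hM3⟩ := statsFold t 1 v v
    refine ⟨m, M, ?_, ?_, ?_, ?_, ?_⟩
    · rw [show statsOf (v :: t) = t.foldl pvAcc (some (1, v, v)) from rfl, hfold]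
      have : (1 : Int) + (t.length : Int) = ((v :: t).length : Int) := by simp; ring
      rw [this]
    · rcases hm1 with e | e
      · exact e ▸ List.mem_cons_self ..
      · exact List.mem_cons_of_mem _ e
    · intro x hx
      rcases List.mem_cons.mp hx with e | e
      · exact e ▸ hm2
      · exact hm3 x e
    · rcases hM1 with e | e
      · exact e ▸ List.mem_cons_self ..
      · exact List.mem_cons_of_mem _ e
    · intro x hx
      rcases List.mem_cons.mp hx with e | e
      · exact e ▸ hM2
      · exact hM3 x e

lemma index?_getElem (S : List Int) (h : S.Nodup) (i : Nat) (hi : i < S.length) :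
    PySem.List.index? S S[i] = some i := by
  induction S generalizing i with
  | nil => simp at hi
  | cons x S ih =>
    cases i with
    | zero => simpa using PySem.List.index?_cons_self x S
    | succ j =>
      have hN := List.nodup_cons.mp h
      have hj : j < S.length := by simpa using hi
      have hx : x ≠ S[j] := fun e => hN.1 (e ▸ List.getElem_mem hj)
      rw [List.getElem_cons_succ, PySem.List.index?_cons_of_ne _ hx, ih hN.2 j hj]
      rfl

lemma list_sum_range (n : Nat) (F : Nat → Int) :
    ((List.range n).map F).sum = ∑ i ∈ Finset.range n, F i := rfl

lemma rowH_sum (S : List Int) (hN : S.Nodup) (h : S ≠ []) :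
    (S.map (rowH S)).sum
      = (11 - 1) + (S.getD (S.length - 1) 0 - S.getD 0 0) - 2 * ((S.length : Int) - 1) := by
  obtain ⟨m, hm⟩ := Nat.exists_eq_succ_of_ne_zero (show S.length ≠ 0 by simpa using h)
  have hmap : S.map (rowH S) = (List.range S.length).map (fun i =>
      (if 0 < i then S.getD i 0 - (S.getD (i - 1) 0 + 1) else S.getD i 0) +
      (if i < S.length - 1 then (S.getD (i + 1) 0 - 1) - S.getD i 0 else (11 - 1) - S.getD i 0)) := by
    apply List.ext_getElem (by simp)
    intro i hi1 hi2
    have hi : i < S.length := by simpa using hi1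
    simp only [List.getElem_map, List.getElem_range]
    unfold rowH
    rw [index?_getElem S hN i hi]
    simp only [Option.getD_some]
    rw [← List.getD_eq_getElem S 0 hi]
  rw [hmap, list_sum_range, Finset.sum_add_distrib, hm, Finset.sum_range_succ',
      Finset.sum_range_succ, Nat.succ_sub_one]
  have e1 : (∑ i ∈ Finset.range m,
      (if 0 < i + 1 then S.getD (i + 1) 0 - (S.getD (i + 1 - 1) 0 + 1) else S.getD (i + 1) 0))
      = ∑ i ∈ Finset.range m,
          ((S.getD (i + 1) 0 - ((i + 1 : Nat) : Int)) - (S.getD i 0 - (i : Int))) := by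
    refine Finset.sum_congr rfl (fun i _ => ?_)
    rw [if_pos (Nat.succ_pos i), Nat.add_sub_cancel]
    push_cast
    ring
  have e2 : (∑ i ∈ Finset.range m,
      (if i < m then (S.getD (i + 1) 0 - 1) - S.getD i 0 else (11 - 1) - S.getD i 0))
      = ∑ i ∈ Finset.range m,
          ((S.getD (i + 1) 0 - ((i + 1 : Nat) : Int)) - (S.getD i 0 - (i : Int))) := by
    refine Finset.sum_congr rfl (fun i hi => ?_)
    have him := Finset.mem_range.mp hi
    rw [if_pos him]
    push_cast
    ring
  rw [e1, e2, Finset.sum_range_sub (fun i => S.getD i 0 - (i : Int)) m]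
  rw [if_neg (by omega : ¬ (0 : Nat) < 0), if_neg (by omega : ¬ m < m)]
  have hc : ((Nat.succ m : Nat) : Int) = (m : Int) + 1 := by push_cast; ring
  rw [hc]
  ring

lemma line_val (l : List Int) (hN : l.Nodup) :
    ((PySem.List.sorted l (fun x => x) false).map (rowH (PySem.List.sorted l (fun x => x) false))).sum
      = axv (statsOf l) := by
  by_cases hl : l = []
  · subst hl
    rw [(PySem.List.sorted_eq_nil_iff [] (fun x : Int => x) false).mpr rfl]
    simp [statsOf, axv]
  · have hperm : (PySem.List.sorted l (fun x => x) false).Perm l := PySem.List.sorted_perm l _ _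
    have hSN : (PySem.List.sorted l (fun x => x) false).Nodup := hperm.nodup_iff.mpr hN
    have hSne : PySem.List.sorted l (fun x => x) false ≠ [] := by
      intro e
      exact hl ((PySem.List.sorted_eq_nil_iff l (fun x => x) false).mp e)
    rw [rowH_sum _ hSN hSne]
    obtain ⟨m, M, hstats, hmMem, hmLe, hMMem, hMLe⟩ := statsOf_char l hl
    rw [hstats]
    have hlen : (PySem.List.sorted l (fun x => x) false).length = l.length := hperm.length_eq
    have h0 : 0 < (PySem.List.sorted l (fun x => x) false).length := by
      exact List.length_pos_iff.mpr hSne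
    -- S[0] = m
    have hmem0 : (PySem.List.sorted l (fun x => x) false)[0] ∈ l :=
      hperm.mem_iff.mp (List.getElem_mem h0)
    obtain ⟨j, hj, hjm⟩ := List.mem_iff_getElem.mp (hperm.mem_iff.mpr hmMem)
    have hle1 : (PySem.List.sorted l (fun x => x) false)[0] ≤ m := by
      rw [← hjm]
      exact PySem.List.sorted_id_getElem_mono l (Nat.zero_le j) hj
    have hge1 : m ≤ (PySem.List.sorted l (fun x => x) false)[0] := hmLe _ hmem0
    -- S[len-1] = M
    have hlast : (PySem.List.sorted l (fun x => x) false).length - 1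
        < (PySem.List.sorted l (fun x => x) false).length := by omega
    have hmemL : (PySem.List.sorted l (fun x => x) false)[(PySem.List.sorted l (fun x => x) false).length - 1] ∈ l :=
      hperm.mem_iff.mp (List.getElem_mem hlast)
    obtain ⟨j2, hj2, hj2m⟩ := List.mem_iff_getElem.mp (hperm.mem_iff.mpr hMMem)
    have hle2 : M ≤ (PySem.List.sorted l (fun x => x) false)[(PySem.List.sorted l (fun x => x) false).length - 1] := by
      rw [← hj2m]
      exact PySem.List.sorted_id_getElem_mono l (by omega) hlast
    have hge2 : (PySem.List.sorted l (fun x => x) false)[(PySem.List.sorted l (fun x => x) false).length - 1] ≤ M :=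
      hMLe _ hmemL
    rw [List.getD_eq_getElem _ _ hlast, List.getD_eq_getElem _ _ h0]
    have eM : (PySem.List.sorted l (fun x => x) false)[(PySem.List.sorted l (fun x => x) false).length - 1] = M :=
      le_antisymm hge2 hle2
    have em : (PySem.List.sorted l (fun x => x) false)[0] = m := le_antisymm hle1 hge1
    rw [eM, em, hlen]
    simp only [axv]

lemma InGrid_swap {P : List (Int × Int)} (hG : InGrid P) : InGrid (P.map Prod.swap) := by
  intro q hq
  rcases List.mem_map.mp hq with ⟨p, hp, rfl⟩
  have := hG p hp
  exact ⟨this.2.2.1, this.2.2.2, this.1, this.2.1⟩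

lemma row_total (Q : List (Int × Int)) (hN : Q.Nodup) (hG : InGrid Q) :
    (Q.map (fun p => rowH (sLine Q p.1) p.2)).sum = MRow Q := by
  have h1 : (Q.map (fun p => rowH (sLine Q p.1) p.2)).sum
      = ∑ r ∈ Finset.range 11, ((lineOf Q (r : Int)).map (rowH (sLine Q (r : Int)))).sum :=
    group_sum Q hG (fun r c => rowH (sLine Q r) c)
  rw [h1]
  refine Finset.sum_congr rfl (fun r _ => ?_)
  have hv : ((PySem.List.sorted (lineOf Q (r : Int)) (fun x => x) false).map
      (rowH (PySem.List.sorted (lineOf Q (r : Int)) (fun x => x) false))).sum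
      = axv (statsOf (lineOf Q (r : Int))) := line_val _ (lineOf_nodup hN _)
  rw [← hv]
  exact ((PySem.List.sorted_perm (lineOf Q (r : Int)) (fun x => x) false).map
    (rowH (sLine Q (r : Int)))).sum_eq.symm

lemma compute_eq_MTot (P : List (Int × Int)) (hN : P.Nodup) (hG : InGrid P) :
    compute_moves P = MTot P := by
  simp only [compute_moves]
  rw [cmBuild_fst P hG, cmBuild_snd P hG, cmSort_arr, cmSort_arr]
  rw [PySem.List.foldl_congr_mem' P _
      (fun total p => total + (rowH (sLine P p.1) p.2 + rowH (sLine (P.map Prod.swap) p.2) p.1)) 0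
      (by
        intro p hp acc
        have hb := hG p hp
        rw [pvArr_getD _ p.1 [] hb.1 hb.2.1, pvArr_getD _ p.2 [] hb.2.2.1 hb.2.2.2]
        rfl)]
  rw [PySem.List.foldl_add P
      (fun p => rowH (sLine P p.1) p.2 + rowH (sLine (P.map Prod.swap) p.2) p.1) 0, zero_add]
  rw [PySem.List.sum_map_add_int P (fun p => rowH (sLine P p.1) p.2)
      (fun p => rowH (sLine (P.map Prod.swap) p.2) p.1)]
  rw [row_total P hN hG]
  have h2 : P.map (fun p => rowH (sLine (P.map Prod.swap) p.2) p.1)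
      = (P.map Prod.swap).map (fun q => rowH (sLine (P.map Prod.swap) q.1) q.2) := by
    rw [List.map_map]
    rfl
  rw [h2, row_total (P.map Prod.swap) (hN.map (fun _ _ h => Prod.swap_injective h)) (InGrid_swap hG)]
  rfl

lemma axv_acc (s : Option (Int × Int × Int)) (v : Int) :
    axv (pvAcc s v) = axv s + pvDelta s v := by
  match s with
  | none => simp [pvAcc, pvDelta, axv]
  | some (c, lo, hi) =>
    simp only [pvAcc, pvDelta, axv]
    omega

lemma MRow_append (P : List (Int × Int)) (q : Int × Int) (h0 : 0 ≤ q.1) (h1 : q.1 < 11) :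
    MRow (P ++ [q]) = MRow P + pvDelta (statsOf (lineOf P q.1)) q.2 := by
  unfold MRow
  have hstep : ∀ r : Nat, axv (statsOf (lineOf (P ++ [q]) (r : Int)))
      = axv (statsOf (lineOf P (r : Int)))
        + (if r = q.1.toNat then pvDelta (statsOf (lineOf P q.1)) q.2 else 0) := by
    intro r
    rw [lineOf_append]
    by_cases e : q.1 = (r : Int)
    · have e2 : lineOf [q] (r : Int) = [q.2] := by simp [lineOf, e]
      rw [e2, if_pos (by omega), show statsOf (lineOf P (r : Int) ++ [q.2])
            = pvAcc (statsOf (lineOf P (r : Int))) q.2 from List.foldl_append .., axv_acc, ← e]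
    · have e2 : lineOf [q] (r : Int) = [] := by simp [lineOf, e]
      rw [e2, if_neg (by omega), List.append_nil, add_zero]
  rw [Finset.sum_congr rfl (fun r _ => hstep r), Finset.sum_add_distrib,
      Finset.sum_ite_eq_of_mem' (Finset.range 11) q.1.toNat _ (Finset.mem_range.mpr (by omega))]

lemma val_eq (P : List (Int × Int)) (hN : P.Nodup) (hG : InGrid P) (r c : Int)
    (hr0 : 0 ≤ r) (hr1 : r < 11) (hc0 : 0 ≤ c) (hc1 : c < 11) (hmem : (r, c) ∉ P) :
    compute_moves (PySem.Set.add P (r, c))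
      = MTot P + pvDelta (statsOf (lineOf P r)) c
              + pvDelta (statsOf (lineOf (P.map Prod.swap) c)) r := by
  have hadd : PySem.Set.add P (r, c) = P ++ [(r, c)] := PySem.Set.add_of_not_mem hmem
  have hnd : (P ++ [(r, c)]).Nodup :=
    hN.append (List.nodup_singleton _)
      (fun x hx hx' => by rcases List.mem_singleton.mp hx' with rfl; exact hmem hx)
  have hgr : InGrid (P ++ [(r, c)]) := by
    intro q hq
    rcases List.mem_append.mp hq with h | h
    · exact hG q h
    · rcases List.mem_singleton.mp h with rfl
      exact ⟨hr0, hr1, hc0, hc1⟩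
  rw [hadd, compute_eq_MTot _ hnd hgr]
  show MRow (P ++ [(r, c)]) + MRow ((P ++ [(r, c)]).map Prod.swap) = _
  rw [MRow_append P (r, c) hr0 hr1]
  have hms : (P ++ [(r, c)]).map Prod.swap = P.map Prod.swap ++ [(c, r)] := by
    simp [Prod.swap]
  rw [hms, MRow_append (P.map Prod.swap) (c, r) hc0 hc1]
  show MRow P + _ + (MRow (P.map Prod.swap) + _) = MRow P + MRow (P.map Prod.swap) + _ + _
  ring

def rowsFun (P : List (Int × Int)) : List (Option (Int × Int × Int)) :=
  pvArr (fun r => statsOf (lineOf P r))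

def colsFun (P : List (Int × Int)) : List (Option (Int × Int × Int)) :=
  rowsFun (P.map Prod.swap)

def StRel (P : List (Int × Int))
    (st : PySem.Set (Int × Int) × List (Option (Int × Int × Int)) ×
          List (Option (Int × Int × Int)) × Int) : Prop :=
  st = (P, rowsFun P, colsFun P, MTot P) ∧ P.Nodup ∧ InGrid P

def stepA (pieces : PySem.Set (Int × Int)) (_x : Int) : PySem.Set (Int × Int) :=
  let best :=
    (PySem.List.pyRange 0 11 1).foldl
      (fun best r =>
        (PySem.List.pyRange 0 11 1).foldl
          (fun (best : Option (Int × Int) × Int) c =>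
            if PySem.Set.contains pieces (r, c) then best
            else
              let val := compute_moves (PySem.Set.add pieces (r, c))
              if best.2 < val then (some (r, c), val) else best)
          best)
      ((none : Option (Int × Int)), (-1 : Int))
  match best.1 with
  | some p => PySem.Set.add pieces p
  | none => pieces

def stepB (st : PySem.Set (Int × Int) × List (Option (Int × Int × Int)) ×
               List (Option (Int × Int × Int)) × Int) (_x : Int) :
    PySem.Set (Int × Int) × List (Option (Int × Int × Int)) ×
    List (Option (Int × Int × Int)) × Int :=
  let pieces := st.1
  let rows := st.2.1
  let cols := st.2.2.1
  let total := st.2.2.2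
  let best :=
    (PySem.List.pyRange 0 11 1).foldl
      (fun best r =>
        (PySem.List.pyRange 0 11 1).foldl
          (fun (best : Option (Int × Int) × Int) c =>
            if PySem.Set.contains pieces (r, c) then best
            else
              let val := total + pvDelta (PySem.List.pyGetD rows r none) c
                               + pvDelta (PySem.List.pyGetD cols c none) r
              if best.2 < val then (some (r, c), val) else best)
          best)
      ((none : Option (Int × Int)), (-1 : Int))
  match best.1 with
  | some p =>
      (PySem.Set.add pieces p,
       PySem.List.pySetD rows p.1 (pvAcc (PySem.List.pyGetD rows p.1 none) p.2),
       PySem.List.pySetD cols p.2 (pvAcc (PySem.List.pyGetD cols p.2 none) p.1),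
       best.2)
  | none => st

lemma MTot_append (P : List (Int × Int)) (q : Int × Int)
    (hr0 : 0 ≤ q.1) (hr1 : q.1 < 11) (hc0 : 0 ≤ q.2) (hc1 : q.2 < 11) :
    MTot (P ++ [q]) = MTot P + pvDelta (statsOf (lineOf P q.1)) q.2
                             + pvDelta (statsOf (lineOf (P.map Prod.swap) q.2)) q.1 := by
  show MRow (P ++ [q]) + MRow ((P ++ [q]).map Prod.swap) = _
  rw [MRow_append P q hr0 hr1]
  have hms : (P ++ [q]).map Prod.swap = P.map Prod.swap ++ [(q.2, q.1)] := by
    simp [Prod.swap]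
  rw [hms, MRow_append (P.map Prod.swap) (q.2, q.1) hc0 hc1]
  show MRow P + _ + (MRow (P.map Prod.swap) + _) = MRow P + MRow (P.map Prod.swap) + _ + _
  ring

lemma rowsFun_append (P : List (Int × Int)) (p : Int × Int) (h0 : 0 ≤ p.1) (h1 : p.1 < 11) :
    PySem.List.pySetD (rowsFun P) p.1 (pvAcc (PySem.List.pyGetD (rowsFun P) p.1 none) p.2)
      = rowsFun (P ++ [p]) := by
  unfold rowsFun
  rw [pvArr_getD _ p.1 none h0 h1, pvArr_setD _ p.1 _ h0 h1]
  refine pvArr_congr (fun k hk0 hk1 => ?_)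
  rw [lineOf_append]
  by_cases e : k = p.1
  · have e2 : lineOf [p] k = [p.2] := by simp [lineOf, e]
    rw [if_pos e, e2, e,
        show statsOf (lineOf P p.1 ++ [p.2]) = pvAcc (statsOf (lineOf P p.1)) p.2 from
          List.foldl_append ..]
  · have e' : p.1 ≠ k := fun hh => e hh.symm
    have e2 : lineOf [p] k = [] := by simp [lineOf, e']
    rw [if_neg e, e2, List.append_nil]

-- the intended value of each candidate, and what the two inner folds both compute
def GoodB (P : List (Int × Int)) (b : Option (Int × Int) × Int) : Prop :=
  b.1 = none ∨ ∃ p : Int × Int, b.1 = some p ∧ p ∉ P ∧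
    0 ≤ p.1 ∧ p.1 < 11 ∧ 0 ≤ p.2 ∧ p.2 < 11 ∧
    b.2 = MTot P + pvDelta (statsOf (lineOf P p.1)) p.2
                 + pvDelta (statsOf (lineOf (P.map Prod.swap) p.2)) p.1

lemma best_good (P : List (Int × Int)) :
    GoodB P ((PySem.List.pyRange 0 11 1).foldl
      (fun best r =>
        (PySem.List.pyRange 0 11 1).foldl
          (fun (best : Option (Int × Int) × Int) c =>
            if PySem.Set.contains P (r, c) then best
            else
              let val := MTot P + pvDelta (PySem.List.pyGetD (rowsFun P) r none) c
                               + pvDelta (PySem.List.pyGetD (colsFun P) c none) r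
              if best.2 < val then (some (r, c), val) else best)
          best)
      ((none : Option (Int × Int)), (-1 : Int))) := by
  refine List.foldlRecOn (motive := fun b => GoodB P b) _ _ (Or.inl rfl) ?_
  intro b hb r hr
  refine List.foldlRecOn (motive := fun b => GoodB P b) _ _ hb ?_
  intro b' hb' c hc
  have hrb := PySem.List.mem_pyRange_one.mp hr
  have hcb := PySem.List.mem_pyRange_one.mp hc
  dsimp only
  split
  · exact hb'
  · next hcon =>
    split
    · refine Or.inr ⟨(r, c), rfl, ?_, hrb.1, hrb.2, hcb.1, hcb.2, ?_⟩
      · intro hm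
        exact hcon ((PySem.Set.contains_iff P (r, c)).mpr hm)
      · show MTot P + pvDelta (PySem.List.pyGetD (rowsFun P) r none) c
              + pvDelta (PySem.List.pyGetD (colsFun P) c none) r = _
        rw [show rowsFun P = pvArr (fun k => statsOf (lineOf P k)) from rfl,
            show colsFun P = pvArr (fun k => statsOf (lineOf (P.map Prod.swap) k)) from rfl,
            pvArr_getD _ r none hrb.1 hrb.2, pvArr_getD _ c none hcb.1 hcb.2]
    · exact hb'

lemma best_eq (P : List (Int × Int)) (hN : P.Nodup) (hG : InGrid P) :
    ((PySem.List.pyRange 0 11 1).foldl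
      (fun best r =>
        (PySem.List.pyRange 0 11 1).foldl
          (fun (best : Option (Int × Int) × Int) c =>
            if PySem.Set.contains P (r, c) then best
            else
              let val := compute_moves (PySem.Set.add P (r, c))
              if best.2 < val then (some (r, c), val) else best)
          best)
      ((none : Option (Int × Int)), (-1 : Int)))
    = ((PySem.List.pyRange 0 11 1).foldl
      (fun best r =>
        (PySem.List.pyRange 0 11 1).foldl
          (fun (best : Option (Int × Int) × Int) c =>
            if PySem.Set.contains P (r, c) then best
            else
              let val := MTot P + pvDelta (PySem.List.pyGetD (rowsFun P) r none) c
                               + pvDelta (PySem.List.pyGetD (colsFun P) c none) r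
              if best.2 < val then (some (r, c), val) else best)
          best)
      ((none : Option (Int × Int)), (-1 : Int))) := by
  refine PySem.List.foldl_congr_mem' _ _ _ _ ?_
  intro r hr best
  refine PySem.List.foldl_congr_mem' _ _ _ _ ?_
  intro c hc best'
  have hrb := PySem.List.mem_pyRange_one.mp hr
  have hcb := PySem.List.mem_pyRange_one.mp hc
  dsimp only
  split
  · rfl
  · next hcon =>
    have hmem : (r, c) ∉ P := fun hm => hcon ((PySem.Set.contains_iff P (r, c)).mpr hm)
    rw [val_eq P hN hG r c hrb.1 hrb.2 hcb.1 hcb.2 hmem,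
        show rowsFun P = pvArr (fun k => statsOf (lineOf P k)) from rfl,
        show colsFun P = pvArr (fun k => statsOf (lineOf (P.map Prod.swap) k)) from rfl,
        pvArr_getD _ r none hrb.1 hrb.2, pvArr_getD _ c none hcb.1 hcb.2]

lemma step_rel (P : List (Int × Int))
    (st : PySem.Set (Int × Int) × List (Option (Int × Int × Int)) ×
          List (Option (Int × Int × Int)) × Int)
    (h : StRel P st) (x : Int) : StRel (stepA P x) (stepB st x) := by
  obtain ⟨hst, hN, hG⟩ := h
  subst hst
  unfold stepA stepB
  dsimp only
  rw [best_eq P hN hG]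
  have hgood := best_good P
  rcases hgood with hnone | ⟨p, hp, hfresh, hb0, hb1, hb2, hb3, hval⟩
  · rw [hnone]
    exact ⟨rfl, hN, hG⟩
  · rw [hp]
    dsimp only
    have haddp : PySem.Set.add P p = P ++ [p] := PySem.Set.add_of_not_mem hfresh
    have hN' : (P ++ [p]).Nodup :=
      hN.append (List.nodup_singleton _)
        (fun y hy hy' => by rcases List.mem_singleton.mp hy' with rfl; exact hfresh hy)
    have hG' : InGrid (P ++ [p]) := by
      intro q hq
      rcases List.mem_append.mp hq with hq | hq
      · exact hG q hq
      · rcases List.mem_singleton.mp hq with rfl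
        exact ⟨hb0, hb1, hb2, hb3⟩
    refine ⟨?_, by rw [haddp]; exact hN', by rw [haddp]; exact hG'⟩
    rw [haddp, rowsFun_append P p hb0 hb1]
    have hcols : PySem.List.pySetD (colsFun P) p.2
        (pvAcc (PySem.List.pyGetD (colsFun P) p.2 none) p.1) = colsFun (P ++ [p]) := by
      show PySem.List.pySetD (rowsFun (P.map Prod.swap)) p.2
          (pvAcc (PySem.List.pyGetD (rowsFun (P.map Prod.swap)) p.2 none) p.1)
          = rowsFun ((P ++ [p]).map Prod.swap)
      have hms : (P ++ [p]).map Prod.swap = P.map Prod.swap ++ [(p.2, p.1)] := by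
        simp [Prod.swap]
      rw [hms]
      exact rowsFun_append (P.map Prod.swap) (p.2, p.1) hb2 hb3
    rw [hcols, hval, ← MTot_append P p hb0 hb1 hb2 hb3]

lemma loop_rel (steps : List Int) (P : List (Int × Int))
    (st : PySem.Set (Int × Int) × List (Option (Int × Int × Int)) ×
          List (Option (Int × Int × Int)) × Int)
    (h : StRel P st) : StRel (steps.foldl stepA P) (steps.foldl stepB st) := by
  induction steps generalizing P st with
  | nil => exact h
  | cons x steps ih => exact ih _ _ (step_rel P st h x)

lemma StRel_init : StRel []
    ((PySem.Set.empty : PySem.Set (Int × Int)), List.replicate 11 none, List.replicate 11 none, 0) := by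
  refine ⟨?_, List.nodup_nil, by intro q hq; cases hq⟩
  have h1 : rowsFun ([] : List (Int × Int)) = List.replicate 11 none := by
    rw [show rowsFun ([] : List (Int × Int)) = pvArr (fun r => statsOf (lineOf [] r)) from rfl,
        pvArr_congr (fun k _ _ => show statsOf (lineOf [] k) = none from rfl), pvArr_const]
  have h2 : colsFun ([] : List (Int × Int)) = List.replicate 11 none := by
    rw [show colsFun ([] : List (Int × Int)) = rowsFun ([] : List (Int × Int)) from rfl, h1]
  have h3 : MTot ([] : List (Int × Int)) = 0 := by
    show MRow [] + MRow [] = 0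
    have : MRow ([] : List (Int × Int)) = 0 := by
      unfold MRow
      refine Finset.sum_eq_zero (fun r _ => rfl)
    rw [this]
    norm_num
  rw [h1, h2, h3]
  rfl

-- ===== VERDICT (by name: the statement is the Claim_ definition above) =====
theorem greedy_add_spec : Claim_equal_greedy_add := by
  intro n _hd _hp
  show greedy_add n = greedy_add_alt n
  have hloop := loop_rel (PySem.List.pyRange 0 n 1) []
    ((PySem.Set.empty : PySem.Set (Int × Int)), List.replicate 11 none, List.replicate 11 none, 0)
    StRel_init
  obtain ⟨hst, hN, hG⟩ := hloop
  have ea : greedy_add n = ((PySem.List.pyRange 0 n 1).foldl stepA ([] : PySem.Set (Int × Int)),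
      compute_moves ((PySem.List.pyRange 0 n 1).foldl stepA ([] : PySem.Set (Int × Int)))) := rfl
  have eb : greedy_add_alt n
      = (((PySem.List.pyRange 0 n 1).foldl stepB
            ((PySem.Set.empty : PySem.Set (Int × Int)), List.replicate 11 none,
             List.replicate 11 none, 0)).1,
         ((PySem.List.pyRange 0 n 1).foldl stepB
            ((PySem.Set.empty : PySem.Set (Int × Int)), List.replicate 11 none,
             List.replicate 11 none, 0)).2.2.2) := rfl
  rw [ea, eb, hst]
  dsimp only
  rw [compute_eq_MTot _ hN hG]
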